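-- pv_equiv track=rewrite | github.com/huangsam/python-algorithms | basic/anagram.py | check_anagram
-- ===== SOURCE A (Python) =====
-- def check_anagram(s1, s2):
--     """Determine if 2 Strings are anagrams.
--
--     Args:
--         s1: First string to evaluate.
--         s2: Second string to evaluate.
--
--     Returns:
--         True if applicable, False otherwise.
--     """
--     smap = {}
--     for c1 in s1:
--         if c1 in smap:
--             smap[c1] += 1
--         else:
--             smap[c1] = 1
--     for c2 in s2:
--         if c2 not in smap:
--             return False
--         smap[c2] -= 1
--         if smap[c2] < 0:
--             return False
--     return True
-- ===== SOURCE B (Python) =====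
-- def check_anagram(s1, s2):
--     smap = {}
--     for c in s1:
--         smap[c] = smap.get(c, 0) + 1
--     tmap = {}
--     for c in s2:
--         tmap[c] = tmap.get(c, 0) + 1
--     return all(v <= smap.get(k, 0) for k, v in tmap.items())
-- ===== Notes on version B (the rewrite author's own statement) =====
-- stated objective: alternative
-- what changed: B builds two frequency tables (one per string) and does a single per-key comparison pass, instead of A's destructive scan that decrements s1's table while walking s2 with early exits.
import Mathlib
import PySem

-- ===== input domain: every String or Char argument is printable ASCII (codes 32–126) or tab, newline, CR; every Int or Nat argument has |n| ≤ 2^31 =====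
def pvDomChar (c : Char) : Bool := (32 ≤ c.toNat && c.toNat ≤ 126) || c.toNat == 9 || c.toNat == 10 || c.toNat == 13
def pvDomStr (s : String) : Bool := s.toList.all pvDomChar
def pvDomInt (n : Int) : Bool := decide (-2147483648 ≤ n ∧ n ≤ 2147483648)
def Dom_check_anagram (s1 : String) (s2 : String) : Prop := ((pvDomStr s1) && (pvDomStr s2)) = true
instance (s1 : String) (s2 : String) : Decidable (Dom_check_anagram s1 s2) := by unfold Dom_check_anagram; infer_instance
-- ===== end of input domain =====

-- B builds two frequency tables and compares them per key instead of A's destructive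
-- decrement-with-early-exit scan; equal cost, different structure ("alternative").

-- ===== PORT A =====
-- first loop of A: count the characters of s1 (branching 'in smap' exactly as A does)
def pvBuildA (s1 : List Char) : PySem.Dict Char Int :=
  s1.foldl (fun d c => if d.contains c then d.modify c 0 (· + 1) else d.insert c 1)
    PySem.Dict.empty

-- second loop of A: walk s2, decrement, early-return False
def pvLoopA : PySem.Dict Char Int → List Char → Bool
  | _, [] => true
  | d, c :: rest =>
    if d.contains c = false then false
    else
      let d' := d.modify c 0 (· - 1)
      if d'.getD c 0 < 0 then false else pvLoopA d' rest

def check_anagram (s1 : String) (s2 : String) : Bool :=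
  pvLoopA (pvBuildA s1.toList) s2.toList

-- ===== PORT B =====
def pvFreq (s : List Char) : PySem.Dict Char Int :=
  s.foldl (fun d c => d.insert c (d.getD c 0 + 1)) PySem.Dict.empty

def check_anagram_alt (s1 : String) (s2 : String) : Bool :=
  let smap := pvFreq s1.toList
  let tmap := pvFreq s2.toList
  tmap.items.all (fun kv => kv.2 ≤ smap.getD kv.1 0)

-- ===== PRECONDITION & SPEC =====
def Spec_check_anagram (s1 : String) (s2 : String) (out : Bool) : Prop := out = check_anagram_alt s1 s2
instance (s1 : String) (s2 : String) (out : Bool) : Decidable (Spec_check_anagram s1 s2 out) := by unfold Spec_check_anagram; infer_instance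

-- ===== CLAIM (what is proved, stated in full; the proofs are below) =====
def Claim_equal_check_anagram : Prop := ∀ (s1 : String) (s2 : String), Dom_check_anagram s1 s2 → Spec_check_anagram s1 s2 (check_anagram s1 s2)

-- ===== LEMMAS AND PROOFS =====

theorem pvBuildA_getD (l : List Char) (d : PySem.Dict Char Int) (c : Char) :
    (l.foldl (fun d c => if d.contains c then d.modify c 0 (· + 1) else d.insert c 1) d).getD c 0
      = d.getD c 0 + l.count c := by
  induction l generalizing d with
  | nil => simp
  | cons x xs ih =>
    simp only [List.foldl_cons, ih, List.count_cons]
    by_cases hx : d.contains x = true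
    · simp only [hx, if_true, PySem.Dict.getD_modify]
      by_cases hcx : c = x
      · subst hcx; simp; ring
      · simp [hcx, Ne.symm hcx]
    · simp only [Bool.not_eq_true] at hx
      simp only [hx, Bool.false_eq_true, if_false, PySem.Dict.getD_insert]
      by_cases hcx : c = x
      · subst hcx
        rw [PySem.Dict.getD_of_not_contains d 0 hx]
        simp; ring
      · simp [hcx, Ne.symm hcx]

theorem pvBuildA_contains (l : List Char) (d : PySem.Dict Char Int) (c : Char) :
    (l.foldl (fun d c => if d.contains c then d.modify c 0 (· + 1) else d.insert c 1) d).contains c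
      = (d.contains c || decide (c ∈ l)) := by
  induction l generalizing d with
  | nil => simp
  | cons x xs ih =>
    simp only [List.foldl_cons, List.mem_cons]
    by_cases hx : d.contains x = true
    · rw [if_pos hx, ih, PySem.Dict.contains_modify]
      by_cases hcx : c = x
      · subst hcx; simp [hx]
      · have : (c == x) = false := by simp [hcx]
        simp [this, hcx]
    · simp only [Bool.not_eq_true] at hx
      rw [if_neg (by simp [hx]), ih, PySem.Dict.contains_insert]
      by_cases hcx : c = x
      · subst hcx; simp
      · have : (c == x) = false := by simp [hcx]
        simp [this, hcx]

-- characterisation of A's second loop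
theorem pvLoopA_iff (t : List Char) (d : PySem.Dict Char Int) :
    pvLoopA d t = true ↔ ∀ c ∈ t, d.contains c = true ∧ (t.count c : Int) ≤ d.getD c 0 := by
  induction t generalizing d with
  | nil => simp [pvLoopA]
  | cons c rest ih =>
    simp only [pvLoopA]
    by_cases hc : d.contains c = true
    · rw [if_neg (by simp [hc]), PySem.Dict.getD_modify_self]
      by_cases hneg : (fun x => x - 1) (d.getD c 0) < 0
      · rw [if_pos hneg]
        have hneg' : d.getD c 0 - 1 < 0 := hneg
        simp only [Bool.false_eq_true, false_iff]
        intro h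
        have h2 := (h c (by simp)).2
        have hc1 : 1 ≤ (c :: rest).count c := by simp [List.count_cons_self]
        have hc2 : (1 : Int) ≤ ((c :: rest).count c : Int) := by exact_mod_cast hc1
        omega
      · rw [if_neg hneg, ih]
        have hneg' : ¬ d.getD c 0 - 1 < 0 := hneg
        constructor
        · intro h x hx
          rcases eq_or_ne x c with rfl | hne
          · refine ⟨hc, ?_⟩
            by_cases hmem : x ∈ rest
            · have h2 := (h x hmem).2
              rw [PySem.Dict.getD_modify_self] at h2
              have h3 : (rest.count x : Int) ≤ d.getD x 0 - 1 := h2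
              have hcnt : (x :: rest).count x = rest.count x + 1 := by
                simp [List.count_cons_self]
              rw [hcnt]; push_cast; omega
            · have hcnt : (x :: rest).count x = 1 := by
                simp [List.count_cons_self, List.count_eq_zero_of_not_mem hmem]
              rw [hcnt]; push_cast; omega
          · have hx' : x ∈ rest := by
              rcases List.mem_cons.mp hx with h' | h'
              · exact absurd h' hne
              · exact h'
            have h2 := h x hx'
            rw [PySem.Dict.contains_modify, PySem.Dict.getD_modify] at h2
            have hb : (x == c) = false := by simp [hne]
            rw [hb] at h2
            simp only [Bool.false_or, if_neg hne] at h2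
            refine ⟨h2.1, ?_⟩
            have hcnt : (c :: rest).count x = rest.count x := by
              simp [Ne.symm hne]
            rw [hcnt]; exact h2.2
        · intro h x hx
          rw [PySem.Dict.contains_modify, PySem.Dict.getD_modify]
          rcases eq_or_ne x c with rfl | hne
          · refine ⟨by simp, ?_⟩
            rw [if_pos rfl]
            have h2 := (h x (by simp)).2
            have hcnt : (x :: rest).count x = rest.count x + 1 := by
              simp [List.count_cons_self]
            rw [hcnt] at h2; push_cast at h2
            show (rest.count x : Int) ≤ d.getD x 0 - 1
            omega
          · have h2 := h x (by simp [hx])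
            have hb : (x == c) = false := by simp [hne]
            rw [hb, if_neg hne]
            simp only [Bool.false_or]
            refine ⟨h2.1, ?_⟩
            have hcnt : (c :: rest).count x = rest.count x := by
              simp [Ne.symm hne]
            rw [hcnt] at h2; exact h2.2
    · simp only [Bool.not_eq_true] at hc
      rw [if_pos hc]
      simp only [Bool.false_eq_true, false_iff]
      intro h
      have h1 := (h c (by simp)).1
      rw [hc] at h1
      exact absurd h1 (by simp)

-- B's build loop is Counter
theorem pvFreq_eq_counter (s : List Char) : pvFreq s = PySem.Dict.counter s :=
  PySem.Dict.foldl_insert_getD_add_one_eq_counter s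

theorem pvAlt_iff (s1 s2 : String) :
    check_anagram_alt s1 s2 = true ↔
      ∀ c ∈ s2.toList, (s2.toList.count c : Int) ≤ (s1.toList.count c : Int) := by
  simp only [check_anagram_alt, pvFreq_eq_counter, PySem.Dict.items_counter,
    List.all_eq_true, List.mem_map, PySem.Dict.getD_counter]
  constructor
  · intro h c hc
    have := h (c, (s2.toList.count c : Int)) ⟨c, by simpa using hc, rfl⟩
    simpa using this
  · rintro h p ⟨c, hc, rfl⟩
    simpa using h c (by simpa using hc)

-- ===== VERDICT (by name: the statement is the Claim_ definition above) =====
theorem check_anagram_spec : Claim_equal_check_anagram := by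
  intro s1 s2 _
  unfold Spec_check_anagram
  rw [Bool.eq_iff_iff, pvAlt_iff]
  unfold check_anagram
  rw [pvLoopA_iff]
  constructor
  · intro h c hc
    have := (h c hc).2
    rw [pvBuildA, pvBuildA_getD] at this
    simpa using this
  · intro h c hc
    have hle := h c hc
    have hpos : 1 ≤ s2.toList.count c := List.one_le_count_iff.mpr hc
    have hmem : c ∈ s1.toList := by
      rw [← List.one_le_count_iff]
      have : (1 : Int) ≤ (s1.toList.count c : Int) := by
        have : (1 : Int) ≤ (s2.toList.count c : Int) := by exact_mod_cast hpos
        omega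
      exact_mod_cast this
    refine ⟨?_, ?_⟩
    · rw [pvBuildA, pvBuildA_contains]; simp [hmem]
    · rw [pvBuildA, pvBuildA_getD]; simpa using hle
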